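-- pv_equiv track=rewrite | github.com/mmbazm/mng_stock | main.py | when_to_buy
-- ===== SOURCE A (Python) =====
-- def when_to_buy(prices):
--     """ this version leverages dynamic programming to improve time complexity.
--     """
--     n = len(prices)
--     trades = []
--     i = 0
--
--     while i < n - 1:
--         # Find local minimum
--         while i < n - 1 and prices[i + 1] <= prices[i]:
--             i += 1
--         if i == n - 1:
--             break
--         buy = i
--         i += 1
--
--         # Find local maximum
--         while i < n and prices[i] >= prices[i - 1]:
--             i += 1
--         sell = i - 1
--
--         trades.append((buy + 1, sell + 1))
--
--     return tuple(trades)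
-- ===== SOURCE B (Python) =====
-- def when_to_buy(prices):
--     """Single pass with a pending-buy state variable instead of nested while loops."""
--     n = len(prices)
--     trades = []
--     buy = None
--     for i in range(n - 1):
--         if prices[i + 1] > prices[i]:
--             if buy is None:
--                 buy = i
--         elif prices[i + 1] < prices[i]:
--             if buy is not None:
--                 trades.append((buy + 1, i + 1))
--                 buy = None
--     if buy is not None:
--         trades.append((buy + 1, n))
--     return tuple(trades)
-- ===== Notes on version B (the rewrite author's own statement) =====
-- stated objective: simpler
-- what changed: Replaced A's nested while-loops (skip-to-local-minimum, then skip-to-local-maximum) by a single for-loop over adjacent pairs that maintains one pending-buy state variable and appends a trade on each strict drop, with a trailing append if a rise is still open.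
import Mathlib
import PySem

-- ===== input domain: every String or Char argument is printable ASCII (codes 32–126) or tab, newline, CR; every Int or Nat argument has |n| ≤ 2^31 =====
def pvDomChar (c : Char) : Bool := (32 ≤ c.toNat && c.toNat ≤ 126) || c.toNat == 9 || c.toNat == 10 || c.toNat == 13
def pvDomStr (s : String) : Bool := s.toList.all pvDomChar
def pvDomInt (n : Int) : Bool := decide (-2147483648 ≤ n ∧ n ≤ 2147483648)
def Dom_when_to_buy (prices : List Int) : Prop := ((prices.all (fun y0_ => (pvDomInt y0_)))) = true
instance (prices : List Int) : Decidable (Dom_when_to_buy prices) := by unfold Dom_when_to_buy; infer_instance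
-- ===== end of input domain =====

-- B replaces A's nested while-loops by one pass with a pending-buy state variable (same O(n) cost, simpler).
-- All indices the Pythons use are provably in range, so ports index with List.getD (exact here).

-- ===== PORT A =====
-- inner while: `while i < n - 1 and prices[i+1] <= prices[i]: i += 1`
def skipDown (p : List Int) (n : Nat) (i : Nat) : Nat :=
  if _h : i < n - 1 ∧ p.getD (i + 1) 0 ≤ p.getD i 0 then skipDown p n (i + 1) else i
termination_by n - 1 - i
decreasing_by omega

-- inner while: `while i < n and prices[i] >= prices[i-1]: i += 1`
def skipUp (p : List Int) (n : Nat) (i : Nat) : Nat :=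
  if _h : i < n ∧ p.getD i 0 ≥ p.getD (i - 1) 0 then skipUp p n (i + 1) else i
termination_by n - i
decreasing_by omega

theorem skipDown_ge (p : List Int) (n i : Nat) : i ≤ skipDown p n i := by
  fun_induction skipDown p n i with
  | case1 i h ih => omega
  | case2 i h => omega

theorem skipUp_ge (p : List Int) (n i : Nat) : i ≤ skipUp p n i := by
  fun_induction skipUp p n i with
  | case1 i h ih => omega
  | case2 i h => omega

-- outer while loop of A
def tradeLoop (p : List Int) (n : Nat) (i : Nat) (trades : List (Int × Int)) : List (Int × Int) :=
  if _hi : i < n - 1 then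
    let i1 := skipDown p n i
    if i1 = n - 1 then trades
    else
      let i2 := skipUp p n (i1 + 1)
      tradeLoop p n i2 (trades ++ [(((i1 + 1 : Nat) : Int), ((((i2 - 1) + 1 : Nat)) : Int))])
  else trades
termination_by n - i
decreasing_by
  have h1 := skipDown_ge p n i
  have h2 := skipUp_ge p n (skipDown p n i + 1)
  omega

def when_to_buy (prices : List Int) : List (Int × Int) :=
  tradeLoop prices prices.length 0 []

-- ===== PORT B =====
-- loop body of B's `for i in range(n - 1)`
def bStep (p : List Int) (st : List (Int × Int) × Option Nat) (i : Nat) :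
    List (Int × Int) × Option Nat :=
  if p.getD (i + 1) 0 > p.getD i 0 then
    match st.2 with
    | none => (st.1, some i)
    | some _ => st
  else if p.getD (i + 1) 0 < p.getD i 0 then
    match st.2 with
    | some b => (st.1 ++ [(((b + 1 : Nat) : Int), ((i + 1 : Nat) : Int))], none)
    | none => st
  else st

-- trailing `if buy is not None: trades.append((buy + 1, n))`
def bFinish (n : Nat) (st : List (Int × Int) × Option Nat) : List (Int × Int) :=
  match st.2 with
  | some b => st.1 ++ [(((b + 1 : Nat) : Int), ((n : Nat) : Int))]
  | none => st.1

def when_to_buy_alt (prices : List Int) : List (Int × Int) :=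
  bFinish prices.length ((List.range (prices.length - 1)).foldl (bStep prices) ([], none))

-- ===== PRECONDITION & SPEC =====
def Spec_when_to_buy (prices : List Int) (out : List (Int × Int)) : Prop := out = when_to_buy_alt prices
instance (prices : List Int) (out : List (Int × Int)) : Decidable (Spec_when_to_buy prices out) := by unfold Spec_when_to_buy; infer_instance

-- ===== CLAIM (what is proved, stated in full; the proofs are below) =====
def Claim_equal_when_to_buy : Prop := ∀ (prices : List Int), Dom_when_to_buy prices → Spec_when_to_buy prices (when_to_buy prices)

-- ===== LEMMAS AND PROOFS =====

theorem skipDown_stop (p : List Int) (n i : Nat)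
    (h : ¬ (i < n - 1 ∧ p.getD (i + 1) 0 ≤ p.getD i 0)) : skipDown p n i = i := by
  rw [skipDown, dif_neg h]

theorem skipDown_step (p : List Int) (n i : Nat)
    (h : i < n - 1 ∧ p.getD (i + 1) 0 ≤ p.getD i 0) : skipDown p n i = skipDown p n (i + 1) := by
  rw [skipDown, dif_pos h]

theorem skipUp_stop (p : List Int) (n i : Nat)
    (h : ¬ (i < n ∧ p.getD i 0 ≥ p.getD (i - 1) 0)) : skipUp p n i = i := by
  rw [skipUp, dif_neg h]

theorem skipUp_step (p : List Int) (n i : Nat)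
    (h : i < n ∧ p.getD i 0 ≥ p.getD (i - 1) 0) : skipUp p n i = skipUp p n (i + 1) := by
  rw [skipUp, dif_pos h]

-- stepping A's outer loop over one flat/descending index
theorem tradeLoop_step (p : List Int) (n j : Nat) (trades : List (Int × Int))
    (hj : j < n - 1) (hle : p.getD (j + 1) 0 ≤ p.getD j 0) :
    tradeLoop p n j trades = tradeLoop p n (j + 1) trades := by
  rw [tradeLoop, dif_pos hj]
  rw [skipDown_step p n j ⟨hj, hle⟩]
  by_cases h2 : j + 1 < n - 1
  · conv_rhs => rw [tradeLoop, dif_pos h2]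
  · have hj1 : j + 1 = n - 1 := by omega
    rw [skipDown_stop p n (j + 1) (by omega), if_pos hj1]
    rw [tradeLoop, dif_neg h2]

-- main invariant: the remaining single-pass fold (from index j, state buy) finished off
-- equals the remaining work of A's nested loops.
theorem main_inv (p : List Int) :
    ∀ (k j : Nat) (trades : List (Int × Int)) (buy : Option Nat),
      j + k = p.length - 1 → (buy.isSome → 1 ≤ p.length) →
      bFinish p.length (List.foldl (bStep p) (trades, buy) (List.range' j k)) =
        (match buy with
         | none => tradeLoop p p.length j trades
         | some b =>
             tradeLoop p p.length (skipUp p p.length (j + 1))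
               (trades ++ [(((b + 1 : Nat) : Int), ((skipUp p p.length (j + 1) : Nat) : Int))])) := by
  intro k
  induction k with
  | zero =>
    intro j trades buy hjk hb
    match buy with
    | none =>
      simp only [List.range'_zero, List.foldl_nil, bFinish]
      rw [tradeLoop, dif_neg (show ¬ j < p.length - 1 by omega)]
    | some b =>
      have hn : 1 ≤ p.length := hb rfl
      have hj1 : j + 1 = p.length := by omega
      simp only [List.range'_zero, List.foldl_nil, bFinish]
      rw [hj1, skipUp_stop p p.length p.length (by omega)]
      rw [tradeLoop, dif_neg (show ¬ p.length < p.length - 1 by omega)]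
  | succ k ih =>
    intro j trades buy hjk hb
    have hj : j < p.length - 1 := by omega
    have hn2 : 2 ≤ p.length := by omega
    rw [List.range'_succ, List.foldl_cons]
    match buy with
    | none =>
      by_cases h1 : p.getD (j + 1) 0 > p.getD j 0
      · have hstep : bStep p (trades, none) j = (trades, some j) := by
          unfold bStep; rw [if_pos h1]
        rw [hstep, ih (j + 1) trades (some j) (by omega) (fun _ => by omega)]
        simp only
        conv_rhs => rw [tradeLoop, dif_pos hj]
        rw [skipDown_stop p p.length j (by intro h; omega)]
        rw [if_neg (show ¬ j = p.length - 1 by omega)]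
        have hu : skipUp p p.length (j + 1) = skipUp p p.length (j + 1 + 1) :=
          skipUp_step p p.length (j + 1)
            ⟨by omega, by rw [Nat.add_sub_cancel]; exact le_of_lt h1⟩
        rw [← hu]
        have hge := skipUp_ge p p.length (j + 1)
        have hc : skipUp p p.length (j + 1) - 1 + 1 = skipUp p p.length (j + 1) := by omega
        simp only [hc]
      · have hle : p.getD (j + 1) 0 ≤ p.getD j 0 := by omega
        have hstep : bStep p (trades, none) j = (trades, none) := by
          unfold bStep; rw [if_neg h1]
          by_cases h2 : p.getD (j + 1) 0 < p.getD j 0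
          · rw [if_pos h2]
          · rw [if_neg h2]
        rw [hstep, ih (j + 1) trades none (by omega) (by simp)]
        simp only
        exact (tradeLoop_step p p.length j trades hj hle).symm
    | some b =>
      by_cases h1 : p.getD (j + 1) 0 > p.getD j 0
      · have hstep : bStep p (trades, some b) j = (trades, some b) := by
          unfold bStep; rw [if_pos h1]
        rw [hstep, ih (j + 1) trades (some b) (by omega) (fun _ => by omega)]
        simp only
        have hu : skipUp p p.length (j + 1) = skipUp p p.length (j + 1 + 1) :=
          skipUp_step p p.length (j + 1)
            ⟨by omega, by rw [Nat.add_sub_cancel]; exact le_of_lt h1⟩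
        rw [hu]
      · by_cases h2 : p.getD (j + 1) 0 < p.getD j 0
        · have hstep : bStep p (trades, some b) j =
              (trades ++ [(((b + 1 : Nat) : Int), ((j + 1 : Nat) : Int))], none) := by
            unfold bStep; rw [if_neg h1, if_pos h2]
          rw [hstep, ih (j + 1) _ none (by omega) (by simp)]
          simp only
          have hu : skipUp p p.length (j + 1) = j + 1 :=
            skipUp_stop p p.length (j + 1) (by
              intro h
              rw [Nat.add_sub_cancel] at h
              omega)
          rw [hu]
        · have heq : p.getD (j + 1) 0 = p.getD j 0 := by omega
          have hstep : bStep p (trades, some b) j = (trades, some b) := by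
            unfold bStep; rw [if_neg h1, if_neg h2]
          rw [hstep, ih (j + 1) trades (some b) (by omega) (fun _ => by omega)]
          simp only
          have hu : skipUp p p.length (j + 1) = skipUp p p.length (j + 1 + 1) :=
            skipUp_step p p.length (j + 1)
              ⟨by omega, by rw [Nat.add_sub_cancel, heq]⟩
          rw [hu]

-- ===== VERDICT (by name: the statement is the Claim_ definition above) =====
theorem when_to_buy_spec : Claim_equal_when_to_buy := by
  intro prices _
  unfold Spec_when_to_buy when_to_buy when_to_buy_alt
  rw [List.range_eq_range']
  exact (main_inv prices (prices.length - 1) 0 [] none (by omega) (by simp)).symm
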